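-- pv_equiv track=rewrite | github.com/MiguelMontesLorenzo/Syntax-aware-Classification-Review | src/Embeddings/data_processing.py | update_lookup_tables
-- ===== SOURCE A (Python) =====
-- from typing import List, Tuple, Dict, Set
-- from collections import Counter
--
-- def update_lookup_tables(vocab_to_int: Dict[str, int], int_to_vocab: Dict[int, str], sentences: List[str]) -> Tuple[Dict[str, int], Dict[int, str]]:
--     """
--     Updates previously built dictionaries with the vocabulary from the IMBD movies reviews.
--
--     Args:
--     - vocab_to_int (Dict[str, int]): Dictionary mapping words to unique integers.
--     - int_to_vocab (Dict[int, str]): Dictionary mapping unique integers to words.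
--     - sentences (List[str]): sentences from the IMBD reviews.
--
--     Returns:
--     - vocab_to_int (Dict[str, int]): updated dictionary mapping words to unique integers.
--     - int_to_vocab (Dict[int, str]): updated dictionary mapping unique integers to words.
--     """
--     new_words: List[str] = [word for sentence in sentences for word in sentence.split() if word not in vocab_to_int]
--
--     word_counts: Counter = Counter(new_words)
--     sorted_vocab: List[int] = sorted(word_counts, key=word_counts.get, reverse=True)
--
--     n_words: int = len(vocab_to_int)
--     for i, word in enumerate(sorted_vocab):
--         index: int = n_words + i
--         vocab_to_int[word] = index
--         int_to_vocab[index] = word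
--
--     return vocab_to_int, int_to_vocab
-- ===== SOURCE B (Python) =====
-- from typing import List, Tuple, Dict
--
-- def update_lookup_tables(vocab_to_int: Dict[str, int], int_to_vocab: Dict[int, str], sentences: List[str]) -> Tuple[Dict[str, int], Dict[int, str]]:
--     # One pass over the sentences: count unknown words directly (no intermediate
--     # word list, no Counter); dict preserves first-occurrence order.
--     counts: Dict[str, int] = {}
--     for sentence in sentences:
--         for word in sentence.split():
--             if word not in vocab_to_int:
--                 counts[word] = counts.get(word, 0) + 1
--
--     # Bucket by count instead of sorting, then walk counts from the maximum down.
--     buckets: Dict[int, List[str]] = {}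
--     for word, cnt in counts.items():
--         buckets.setdefault(cnt, []).append(word)
--
--     index: int = len(vocab_to_int)
--     for c in range(max(counts.values(), default=0), 0, -1):
--         for word in buckets.get(c, []):
--             vocab_to_int[word] = index
--             int_to_vocab[index] = word
--             index += 1
--
--     return vocab_to_int, int_to_vocab
-- ===== Notes on version B (the rewrite author's own statement) =====
-- stated objective: alternative
-- what changed: Replaces A's new-words list + Counter + stable reverse sort + enumerate with a single counting pass over the sentences, count-buckets filled in first-occurrence order, a walk of the counts from the maximum down, and a running index.
import Mathlib
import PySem

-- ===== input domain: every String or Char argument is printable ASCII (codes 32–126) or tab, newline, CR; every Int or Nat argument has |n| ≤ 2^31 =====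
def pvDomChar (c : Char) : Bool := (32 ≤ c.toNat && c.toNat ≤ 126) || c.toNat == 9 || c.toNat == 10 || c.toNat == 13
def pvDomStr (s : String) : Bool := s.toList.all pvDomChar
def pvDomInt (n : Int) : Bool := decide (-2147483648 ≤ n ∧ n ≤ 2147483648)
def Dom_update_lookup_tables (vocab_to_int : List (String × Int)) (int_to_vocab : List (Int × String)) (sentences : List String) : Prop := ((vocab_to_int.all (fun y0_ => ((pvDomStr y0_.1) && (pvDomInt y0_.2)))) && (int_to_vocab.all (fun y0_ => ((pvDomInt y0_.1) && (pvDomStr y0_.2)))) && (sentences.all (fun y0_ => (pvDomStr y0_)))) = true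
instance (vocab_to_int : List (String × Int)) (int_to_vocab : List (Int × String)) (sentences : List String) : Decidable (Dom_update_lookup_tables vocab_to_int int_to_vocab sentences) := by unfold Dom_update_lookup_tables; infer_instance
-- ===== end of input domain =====

-- B replaces A's new-words list + Counter + stable reverse sort + enumerate with one
-- counting pass over the sentences, count-buckets in first-occurrence order walked from
-- the maximum count down, and a running index (alternative decomposition, similar cost).
-- The Python functions mutate the input dicts in place (B performs the same mutation);
-- the equivalence proved here is about the returned dicts.

-- ===== PORT A =====
def update_lookup_tables (vocab_to_int : List (String × Int)) (int_to_vocab : List (Int × String)) (sentences : List String) : (List (String × Int)) × (List (Int × String)) :=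
  let vd := PySem.Dict.ofList vocab_to_int
  let iv := PySem.Dict.ofList int_to_vocab
  let new_words : List String := sentences.flatMap
    (fun sentence => (PySem.Str.split₀ sentence).filter (fun word => !(vd.contains word)))
  let word_counts := PySem.Dict.counter new_words
  let sorted_vocab := PySem.List.sorted word_counts.keys (fun w => word_counts.getD w 0) true
  let n_words : Int := (vd.size : Int)
  let r := (PySem.List.enumerate sorted_vocab 0).foldl
    (fun (p : PySem.Dict String Int × PySem.Dict Int String) iw =>
      (p.1.insert iw.2 (n_words + iw.1), p.2.insert (n_words + iw.1) iw.2)) (vd, iv)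
  (r.1.items, r.2.items)

-- ===== PORT B =====
def update_lookup_tables_alt (vocab_to_int : List (String × Int)) (int_to_vocab : List (Int × String)) (sentences : List String) : (List (String × Int)) × (List (Int × String)) :=
  let vd := PySem.Dict.ofList vocab_to_int
  let iv := PySem.Dict.ofList int_to_vocab
  -- one counting pass over the sentences; unknown words only
  let counts : PySem.Dict String Int := sentences.foldl
    (fun counts sentence => (PySem.Str.split₀ sentence).foldl
      (fun counts word =>
        if vd.contains word then counts else counts.modify word 0 (· + 1)) counts)
    PySem.Dict.empty
  -- buckets.setdefault(cnt, []).append(word)  (modify = get-or-default then store back)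
  let buckets : PySem.Dict Int (List String) := counts.items.foldl
    (fun b kv => b.modify kv.2 [] (· ++ [kv.1])) PySem.Dict.empty
  let max_count : Int := PySem.List.maxD counts.values (fun v => v) 0
  let st := (PySem.List.pyRange max_count 0 (-1)).foldl
    (fun (st : PySem.Dict String Int × PySem.Dict Int String × Int) c =>
      (buckets.getD c []).foldl
        (fun st word => (st.1.insert word st.2.2, st.2.1.insert st.2.2 word, st.2.2 + 1)) st)
    (vd, iv, (vd.size : Int))
  (st.1.items, st.2.1.items)

-- ===== PRECONDITION & SPEC =====
def Spec_update_lookup_tables (vocab_to_int : List (String × Int)) (int_to_vocab : List (Int × String)) (sentences : List String) (out : (List (String × Int)) × (List (Int × String))) : Prop := out = update_lookup_tables_alt vocab_to_int int_to_vocab sentences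
instance (vocab_to_int : List (String × Int)) (int_to_vocab : List (Int × String)) (sentences : List String) (out : (List (String × Int)) × (List (Int × String))) : Decidable (Spec_update_lookup_tables vocab_to_int int_to_vocab sentences out) := by unfold Spec_update_lookup_tables; infer_instance

-- ===== CLAIM (what is proved, stated in full; the proofs are below) =====
def Claim_equal_update_lookup_tables : Prop := ∀ (vocab_to_int : List (String × Int)) (int_to_vocab : List (Int × String)) (sentences : List String), Dom_update_lookup_tables vocab_to_int int_to_vocab sentences → Spec_update_lookup_tables vocab_to_int int_to_vocab sentences (update_lookup_tables vocab_to_int int_to_vocab sentences)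

-- ===== LEMMAS AND PROOFS =====

theorem insertBy_cons (before : String → String → Bool) (x y : String) (ys : List String) :
    PySem.List.insertBy before x (y :: ys) =
      if before x y then x :: y :: ys else y :: PySem.List.insertBy before x ys := rfl

theorem insertBy_append_not (before : String → String → Bool) (x : String) (l1 l2 : List String)
    (h : ∀ y ∈ l1, before x y = false) :
    PySem.List.insertBy before x (l1 ++ l2) = l1 ++ PySem.List.insertBy before x l2 := by
  induction l1 with
  | nil => simp
  | cons y t ih =>
    simp only [List.cons_append, insertBy_cons, h y (by simp)]
    simp only [ih (fun z hz => h z (by simp [hz]))]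
    simp

theorem insertBy_head_lt (before : String → String → Bool) (x : String) (l2 : List String)
    (h : ∀ y ∈ l2, before x y = true) :
    PySem.List.insertBy before x l2 = x :: l2 := by
  cases l2 with
  | nil => rfl
  | cons z t => rw [insertBy_cons, if_pos (h z (by simp))]

-- A stable reverse sort is the concatenation of the key-groups taken in strictly
-- decreasing key order (first-occurrence order inside a group).
theorem sorted_rev_eq_groups (ks : List String) (key : String → Int) (cs : List Int)
    (hdec : cs.Pairwise (fun a b => b < a)) (hmem : ∀ x ∈ ks, key x ∈ cs) :
    PySem.List.sorted ks key true = cs.flatMap (fun c => ks.filter (fun x => key x == c)) := by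
  rw [PySem.List.sorted_rev_eq_foldl_insertBy]
  induction ks using List.reverseRecOn with
  | nil => simp
  | append_singleton ks x ih =>
    rw [List.foldl_append]
    simp only [List.foldl_cons, List.foldl_nil]
    rw [ih (fun z hz => hmem z (by simp [hz]))]
    have hx : key x ∈ cs := hmem x (by simp)
    obtain ⟨cs1, cs2, hcs⟩ := List.append_of_mem hx
    subst hcs
    have hpair := hdec
    rw [List.pairwise_append] at hpair
    obtain ⟨h1, h2, h12⟩ := hpair
    have hgt1 : ∀ c ∈ cs1, key x < c := fun c hc => h12 c hc (key x) (by simp)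
    have hlt2 : ∀ c ∈ cs2, c < key x := fun c hc => (List.pairwise_cons.mp h2).1 c hc
    have hfx1 : ∀ y ∈ (cs1.flatMap (fun c => ks.filter (fun z => key z == c)) ++
        ks.filter (fun z => key z == key x)), (fun a b => decide (key b < key a)) x y = false := by
      intro y hy
      rcases List.mem_append.mp hy with hy | hy
      · obtain ⟨c, hc, hyc⟩ := List.mem_flatMap.mp hy
        have : key y = c := by simpa using (List.mem_filter.mp hyc).2
        have := hgt1 c hc
        simp only [decide_eq_false_iff_not]
        omega
      · have : key y = key x := by simpa using (List.mem_filter.mp hy).2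
        simp only [decide_eq_false_iff_not]
        omega
    have hfx2 : ∀ y ∈ cs2.flatMap (fun c => ks.filter (fun z => key z == c)),
        (fun a b => decide (key b < key a)) x y = true := by
      intro y hy
      obtain ⟨c, hc, hyc⟩ := List.mem_flatMap.mp hy
      have : key y = c := by simpa using (List.mem_filter.mp hyc).2
      have := hlt2 c hc
      simp only [decide_eq_true_eq]
      omega
    have hfiltx1 : ∀ c ∈ cs1, (ks ++ [x]).filter (fun z => key z == c) =
        ks.filter (fun z => key z == c) := by
      intro c hc
      have := hgt1 c hc
      rw [List.filter_append]
      have : (key x == c) = false := by simp; omega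
      simp [List.filter, this]
    have hfiltx2 : ∀ c ∈ cs2, (ks ++ [x]).filter (fun z => key z == c) =
        ks.filter (fun z => key z == c) := by
      intro c hc
      have := hlt2 c hc
      rw [List.filter_append]
      have : (key x == c) = false := by simp; omega
      simp [List.filter, this]
    have hfiltx : (ks ++ [x]).filter (fun z => key z == key x) =
        ks.filter (fun z => key z == key x) ++ [x] := by
      rw [List.filter_append]
      simp [List.filter]
    rw [List.flatMap_append, List.flatMap_cons]
    rw [List.flatMap_append, List.flatMap_cons]
    rw [List.flatMap_congr (fun c hc => hfiltx1 c hc), List.flatMap_congr (fun c hc => hfiltx2 c hc),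
        hfiltx]
    rw [show cs1.flatMap (fun c => ks.filter (fun z => key z == c)) ++
          (ks.filter (fun z => key z == key x) ++
            cs2.flatMap (fun c => ks.filter (fun z => key z == c))) =
        (cs1.flatMap (fun c => ks.filter (fun z => key z == c)) ++
          ks.filter (fun z => key z == key x)) ++
            cs2.flatMap (fun c => ks.filter (fun z => key z == c)) by simp]
    rw [insertBy_append_not _ _ _ _ hfx1, insertBy_head_lt _ _ _ hfx2]
    simp

theorem foldl_foldl_flatMap {α σ β : Type} (g : α → List β) (f : σ → β → σ)
    (cs : List α) (init : σ) :
    cs.foldl (fun st c => (g c).foldl f st) init = (cs.flatMap g).foldl f init := by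
  induction cs generalizing init with
  | nil => rfl
  | cons c t ih => simp [List.flatMap_cons, List.foldl_append, ih]

theorem foldl_if_skip {σ β : Type} (p : β → Bool) (f : σ → β → σ) (l : List β) (init : σ) :
    l.foldl (fun st x => if p x then st else f st x) init
      = (l.filter (fun x => !p x)).foldl f init := by
  induction l generalizing init with
  | nil => rfl
  | cons x t ih =>
    by_cases h : p x
    · simp [h, ih]
    · simp [h, ih]

-- B's single counting pass over the sentences equals Counter of A's new-words list.
theorem counts_eq (vd : PySem.Dict String Int) (sentences : List String) :
    sentences.foldl
      (fun counts sentence => (PySem.Str.split₀ sentence).foldl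
        (fun counts word =>
          if vd.contains word then counts else counts.modify word 0 (· + 1)) counts)
      PySem.Dict.empty
    = PySem.Dict.counter (sentences.flatMap
        (fun sentence => (PySem.Str.split₀ sentence).filter (fun word => !(vd.contains word)))) := by
  rw [foldl_foldl_flatMap, foldl_if_skip, PySem.Dict.counter_eq_foldl]
  congr 1
  rw [List.filter_flatMap]

theorem loop_eq (xs : List String) (vd : PySem.Dict String Int) (iv : PySem.Dict Int String)
    (n j : Int) :
    xs.foldl (fun st word => (st.1.insert word st.2.2, st.2.1.insert st.2.2 word, st.2.2 + 1))
        (vd, iv, n + j)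
      = (((PySem.List.enumerate xs j).foldl
            (fun (p : PySem.Dict String Int × PySem.Dict Int String) iw =>
              (p.1.insert iw.2 (n + iw.1), p.2.insert (n + iw.1) iw.2)) (vd, iv)).1,
         ((PySem.List.enumerate xs j).foldl
            (fun (p : PySem.Dict String Int × PySem.Dict Int String) iw =>
              (p.1.insert iw.2 (n + iw.1), p.2.insert (n + iw.1) iw.2)) (vd, iv)).2,
         n + j + (xs.length : Int)) := by
  induction xs generalizing vd iv j with
  | nil => simp [PySem.List.enumerate_nil]
  | cons x t ih =>
    rw [PySem.List.enumerate_cons]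
    simp only [List.foldl_cons]
    have := ih (vd.insert x (n + j)) (iv.insert (n + j) x) (j + 1)
    rw [show n + (j + 1) = n + j + 1 by ring] at this
    rw [this]
    simp only [List.length_cons, Prod.mk.injEq]
    refine ⟨trivial, trivial, ?_⟩
    push_cast
    ring

theorem getD_buckets (l : List (String × Int)) (c : Int) :
    (l.foldl (fun (b : PySem.Dict Int (List String)) kv => b.modify kv.2 [] (· ++ [kv.1]))
        PySem.Dict.empty).getD c []
      = (l.filter (fun kv => kv.2 == c)).map (·.1) := by
  have h := PySem.Dict.getD_foldl_modify_append (l.map (fun kv => (kv.2, kv.1)))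
    (PySem.Dict.empty : PySem.Dict Int (List String)) c
  simp only [List.foldl_map] at h
  rw [h]
  simp only [List.filter_map, PySem.Dict.getD_empty, List.map_map, Function.comp_def,
    List.nil_append]

theorem buckets_walk_eq_sorted (nw : List String)
    (wc : PySem.Dict String Int) (hwc : wc = PySem.Dict.counter nw) :
    (PySem.List.pyRange (PySem.List.maxD wc.values (fun v => v) 0) 0 (-1)).flatMap
        (fun c => (wc.items.foldl
          (fun (b : PySem.Dict Int (List String)) kv => b.modify kv.2 [] (· ++ [kv.1]))
          PySem.Dict.empty).getD c [])
      = PySem.List.sorted wc.keys (fun w => wc.getD w 0) true := by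
  subst hwc
  have hkey : (fun w => (PySem.Dict.counter nw).getD w 0)
      = fun w => ((nw.count w : Nat) : Int) :=
    funext fun w => PySem.Dict.getD_counter nw w
  set maxc : Int := PySem.List.maxD (PySem.Dict.counter nw).values (fun v => v) 0 with hmaxc
  have hdec : (PySem.List.pyRange maxc 0 (-1)).Pairwise (fun a b => b < a) := by
    rw [PySem.List.pyRange_neg_one, List.pairwise_map]
    exact List.pairwise_lt_range.imp (fun h => by omega)
  have hmem : ∀ w ∈ PySem.Set.ofList nw, ((nw.count w : Nat) : Int) ∈
      PySem.List.pyRange maxc 0 (-1) := by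
    intro w hw
    rw [PySem.List.mem_pyRange_neg_one]
    have hwnw : w ∈ nw := (PySem.Set.mem_ofList nw w).mp hw
    have hval : ((nw.count w : Nat) : Int) ∈ (PySem.Dict.counter nw).values := by
      have h1 : (w, ((nw.count w : Nat) : Int)) ∈ (PySem.Dict.counter nw).items := by
        rw [PySem.Dict.items_counter]
        exact List.mem_map_of_mem hw
      simpa [PySem.Dict.values] using List.mem_map_of_mem (f := fun p => p.2) h1
    refine ⟨by exact_mod_cast List.count_pos_iff.mpr hwnw, ?_⟩
    cases hmax : PySem.List.max? (PySem.Dict.counter nw).values (fun v => v) with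
    | none =>
      rw [PySem.List.max?_eq_none_iff] at hmax
      rw [hmax] at hval
      simp at hval
    | some m =>
      have hle := PySem.List.max?_isMax hmax _ hval
      have : maxc = m := by rw [hmaxc]; simp [PySem.List.maxD, hmax]
      rw [this]
      exact hle
  have hbuckets : ∀ c : Int,
      ((PySem.Dict.counter nw).items.foldl
        (fun (b : PySem.Dict Int (List String)) kv => b.modify kv.2 [] (· ++ [kv.1]))
        PySem.Dict.empty).getD c []
      = (PySem.Set.ofList nw).filter (fun w => ((nw.count w : Nat) : Int) == c) := by
    intro c
    rw [getD_buckets, PySem.Dict.items_counter, List.filter_map, List.map_map]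
    simp [Function.comp_def]
  rw [PySem.Dict.keys_counter, hkey]
  rw [sorted_rev_eq_groups (PySem.Set.ofList nw) (fun w => ((nw.count w : Nat) : Int))
    (PySem.List.pyRange maxc 0 (-1)) hdec hmem]
  exact List.flatMap_congr (fun c _ => hbuckets c)

-- ===== VERDICT (by name: the statement is the Claim_ definition above) =====
theorem update_lookup_tables_spec : Claim_equal_update_lookup_tables := by
  intro vocab_to_int int_to_vocab sentences _
  unfold Spec_update_lookup_tables update_lookup_tables update_lookup_tables_alt
  simp only []
  set vd := PySem.Dict.ofList vocab_to_int with hvd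
  set iv := PySem.Dict.ofList int_to_vocab with hiv
  set nw := sentences.flatMap
    (fun sentence => (PySem.Str.split₀ sentence).filter (fun word => !(vd.contains word))) with hnw
  set wc := PySem.Dict.counter nw with hwc
  rw [counts_eq vd sentences, ← hnw, ← hwc]
  rw [foldl_foldl_flatMap]
  rw [buckets_walk_eq_sorted nw wc hwc]
  rw [show ((vd.size : Nat) : Int) = ((vd.size : Nat) : Int) + 0 by ring]
  rw [loop_eq]
  simp
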